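-- pv_equiv track=rewrite | github.com/AnandMaha/CS218_Algorithms | hw_2/bookshelf.py | find_min_width
-- ===== SOURCE A (Python) =====
-- def feasible(k, thickness, max_width):
--     count = 1
--     width = 0
--     for book in thickness:
--         if width + book > max_width:
--             count += 1
--             width = 0
--         if count > k:
--             return False
--         width += book
--     return True
--
-- def find_min_width(k, thickness):
--     left = max(thickness)
--     right = sum(thickness)
--
--     while left < right:
--         mid = (left + right) // 2
--         if feasible(k, thickness, mid):
--             right = mid
--         else:
--             left = mid + 1
--
--     return left
-- ===== SOURCE B (Python) =====
-- def find_min_width(k, thickness):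
--     # DP over prefix sums: dp[i] = min possible max-shelf-width for the first i
--     # books on the current number of shelves; layer j built from layer j-1.
--     n = len(thickness)
--     prefix = [0]
--     total = 0
--     for b in thickness:
--         total += b
--         prefix.append(total)
--     kk = max(k, 1)
--     if kk > n:
--         kk = n if n > 0 else 1
--     dp = list(prefix)                 # one shelf: dp[i] = prefix[i]
--     for _ in range(2, kk + 1):
--         ndp = [0]
--         for i in range(1, n + 1):
--             best = max(dp[0], prefix[i] - prefix[0])
--             for p in range(1, i + 1):
--                 cand = max(dp[p], prefix[i] - prefix[p])
--                 if cand < best: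
--                     best = cand
--             ndp.append(best)
--         dp = ndp
--     return dp[n]
-- ===== Notes on version B (the rewrite author's own statement) =====
-- stated objective: alternative
-- what changed: Replaces A's binary search over candidate widths (re-running the greedy feasibility scan at each probe) with a prefix-sum dynamic program dp[j][i] = minimum possible max-shelf-width for the first i books on j shelves, answering with dp[min(max(k,1),n)][n].
-- outside the precondition, e.g. on find_min_width(2, [3, -1]): A returns 3, B returns 2
import Mathlib
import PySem

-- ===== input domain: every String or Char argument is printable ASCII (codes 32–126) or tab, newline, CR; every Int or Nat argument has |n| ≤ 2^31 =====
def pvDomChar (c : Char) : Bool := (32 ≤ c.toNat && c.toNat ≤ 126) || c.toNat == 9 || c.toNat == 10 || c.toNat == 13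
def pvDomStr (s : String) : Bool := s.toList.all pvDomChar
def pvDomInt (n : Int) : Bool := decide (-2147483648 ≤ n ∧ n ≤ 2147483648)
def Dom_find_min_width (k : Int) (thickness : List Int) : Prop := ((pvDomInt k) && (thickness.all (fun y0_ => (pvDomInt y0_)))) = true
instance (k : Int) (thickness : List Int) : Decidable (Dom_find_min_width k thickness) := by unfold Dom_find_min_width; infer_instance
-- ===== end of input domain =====

-- B replaces A's binary search over feasible widths by a prefix-sum dynamic program
-- (dp[j][i] = best max-shelf-width for the first i books on j shelves): an alternative
-- algorithm of similar size, not claimed faster.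

-- ===== PORT A =====

-- greedy feasibility check: loop over books with (count, width) state, early False
def feasibleGo (k w : Int) : List Int → Int → Int → Bool
  | [], _, _ => true
  | b :: rest, count, width =>
    let count' := if width + b > w then count + 1 else count
    let width' := if width + b > w then 0 else width
    if count' > k then false
    else feasibleGo k w rest count' (width' + b)

def feasible (k : Int) (thickness : List Int) (max_width : Int) : Bool :=
  feasibleGo k max_width thickness 1 0

-- the 'while left < right' binary-search loop
def fmwGo (k : Int) (t : List Int) (left right : Int) : Int :=
  if h : left < right then
    let mid := PySem.Int.floordiv (left + right) 2
    if feasible k t mid then fmwGo k t left mid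
    else fmwGo k t (mid + 1) right
  else left
termination_by (right - left).toNat
decreasing_by
  · have h1 := (PySem.Int.le_floordiv_iff_mul_le (a := left + right) (b := 2) (q := left) (by omega)).mpr (by omega)
    have h2 := (PySem.Int.floordiv_lt_iff_lt_mul (a := left + right) (b := 2) (q := right) (by omega)).mpr (by omega)
    omega
  · have h1 := (PySem.Int.le_floordiv_iff_mul_le (a := left + right) (b := 2) (q := left) (by omega)).mpr (by omega)
    have h2 := (PySem.Int.floordiv_lt_iff_lt_mul (a := left + right) (b := 2) (q := right) (by omega)).mpr (by omega)
    omega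

def find_min_width (k : Int) (thickness : List Int) : Int :=
  match PySem.List.max? thickness (fun x => x) with
  | none => 0   -- Python raises ValueError here (max of empty); excluded by Pre_
  | some left => fmwGo k thickness left thickness.sum

-- ===== PORT B =====

-- prefix = [0]; total = 0; for b in thickness: total += b; prefix.append(total)
def fmwAltPrefix (thickness : List Int) : List Int × Int :=
  thickness.foldl (fun acc b => (acc.1 ++ [acc.2 + b], acc.2 + b)) ([0], 0)

-- inner loop: best over split points p in range(0, i+1); indices are always in
-- range in Source B, so list indexing dp[p] is ported as getD _ 0 (default never used)
def fmwAltBest (prefixL dp : List Int) (i : Nat) : Int :=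
  (List.range' 1 i).foldl
    (fun best p =>
      let cand := max (dp.getD p 0) (prefixL.getD i 0 - prefixL.getD p 0)
      if cand < best then cand else best)
    (max (dp.getD 0 0) (prefixL.getD i 0 - prefixL.getD 0 0))

-- ndp = [0]; for i in range(1, n+1): ndp.append(best)
def fmwAltLayer (prefixL dp : List Int) (n : Nat) : List Int :=
  (List.range' 1 n).foldl (fun ndp i => ndp ++ [fmwAltBest prefixL dp i]) [0]

def find_min_width_alt (k : Int) (thickness : List Int) : Int :=
  let n := thickness.length
  let prefixL := (fmwAltPrefix thickness).1
  let kk0 := max k 1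
  let kk : Int := if kk0 > (n : Int) then (if (0 : Int) < (n : Int) then (n : Int) else 1) else kk0
  let dp := (PySem.List.pyRange 2 (kk + 1) 1).foldl (fun dp _ => fmwAltLayer prefixL dp n) prefixL
  dp.getD n 0

-- ===== PRECONDITION & SPEC =====
-- Pre_ excludes the empty list, on which A raises ValueError, and lists containing a
-- negative thickness — outside the function's natural domain (book thicknesses), where
-- A's binary search runs on a non-monotone predicate and its value is an accident of
-- the search path.
def Pre_find_min_width (k : Int) (thickness : List Int) : Prop :=
  thickness ≠ [] ∧ ∀ x ∈ thickness, 0 ≤ x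
instance (k : Int) (thickness : List Int) : Decidable (Pre_find_min_width k thickness) := by
  unfold Pre_find_min_width; infer_instance

def pvWitness_find_min_width : Int × List Int := (2, [1, 2, 3])

def Spec_find_min_width (k : Int) (thickness : List Int) (out : Int) : Prop :=
  out = find_min_width_alt k thickness
instance (k : Int) (thickness : List Int) (out : Int) : Decidable (Spec_find_min_width k thickness out) := by
  unfold Spec_find_min_width; infer_instance

-- ===== CLAIM (what is proved, stated in full; the proofs are below) =====
def Claim_equal_find_min_width : Prop := ∀ (k : Int) (thickness : List Int), Dom_find_min_width k thickness → Pre_find_min_width k thickness → Spec_find_min_width k thickness (find_min_width k thickness)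


-- ===== LEMMAS AND PROOFS =====

-- prefix sums of the first i books
def psum (t : List Int) (i : Nat) : Int := (t.take i).sum

-- min of f over 0..i
def minp (f : Nat → Int) : Nat → Int
  | 0 => f 0
  | p + 1 => min (minp f p) (f (p + 1))

-- clean DP value: dpM t j i = best max-shelf width for the first i books on j+1 shelves
def dpM (t : List Int) : Nat → Nat → Int
  | 0, i => psum t i
  | j + 1, i => minp (fun p => max (dpM t j p) (psum t i - psum t p)) i

-- greedy shelf-filling state machine of A's `feasible` (count, width), no early exit
def gRun (w : Int) : List Int → Int × Int → Int × Int
  | [], s => s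
  | b :: rest, s => if s.2 + b > w then gRun w rest (s.1 + 1, b) else gRun w rest (s.1, s.2 + b)

-- splits of l into exactly j (possibly empty) contiguous parts of sum ≤ w
def MSplit (j : Nat) (l : List Int) (w : Int) : Prop :=
  ∃ ps : List (List Int), ps.length = j ∧ ps.flatten = l ∧ ∀ p ∈ ps, p.sum ≤ w

theorem minp_le (f : Nat → Int) {p i : Nat} (h : p ≤ i) : minp f i ≤ f p := by
  induction i with
  | zero => interval_cases p; simp [minp]
  | succ n ih =>
    rcases Nat.lt_or_ge p (n+1) with hp | hp
    · exact le_trans (by simp [minp]) (ih (by omega))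
    · have : p = n + 1 := by omega
      subst this; simp [minp]

theorem minp_exists (f : Nat → Int) (i : Nat) : ∃ p, p ≤ i ∧ minp f i = f p := by
  induction i with
  | zero => exact ⟨0, le_refl _, rfl⟩
  | succ n ih =>
    rcases ih with ⟨p, hp, he⟩
    rcases le_total (minp f n) (f (n+1)) with h | h
    · refine ⟨p, by omega, ?_⟩
      show min (minp f n) (f (n+1)) = f p
      rw [min_eq_left h, he]
    · refine ⟨n+1, le_refl _, ?_⟩
      show min (minp f n) (f (n+1)) = f (n+1)
      exact min_eq_right h

theorem minp_congr (f g : Nat → Int) (i : Nat) (h : ∀ p ≤ i, f p = g p) :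
    minp f i = minp g i := by
  induction i with
  | zero => simp [minp, h 0 (by omega)]
  | succ n ih => simp [minp, ih (fun p hp => h p (by omega)), h (n+1) (le_refl _)]

-- ---------- basic psum / segment facts ----------

theorem psum_succ (t : List Int) (b : Int) (i : Nat) :
    psum (b :: t) (i + 1) = b + psum t i := by
  simp [psum, List.take_succ_cons]

theorem psum_length (t : List Int) : psum t t.length = t.sum := by
  simp [psum]

theorem seg_sum (t : List Int) (p i : Nat) (hpi : p ≤ i) :
    ((t.take i).drop p).sum = psum t i - psum t p := by
  have h1 := List.sum_take_add_sum_drop (t.take i) p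
  have h2 : (t.take i).take p = t.take p := by
    rw [List.take_take]; simp [Nat.min_eq_left hpi]
  rw [h2] at h1
  unfold psum
  omega

-- ---------- MSplit facts ----------

theorem MSplit_mono (j : Nat) (l : List Int) {w w' : Int} (h : MSplit j l w) (hw : w ≤ w') :
    MSplit j l w' := by
  rcases h with ⟨ps, h1, h2, h3⟩
  exact ⟨ps, h1, h2, fun p hp => le_trans (h3 p hp) hw⟩

theorem MSplit_pad (j j' : Nat) (l : List Int) {w : Int} (h : MSplit j l w) (hw : 0 ≤ w)
    (hj : j ≤ j') : MSplit j' l w := by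
  rcases h with ⟨ps, h1, h2, h3⟩
  refine ⟨List.replicate (j' - j) [] ++ ps, by simp [h1]; omega, by simp [h2], ?_⟩
  intro p hp
  rcases List.mem_append.mp hp with hp | hp
  · have := List.eq_of_mem_replicate hp; subst this; simpa using hw
  · exact h3 p hp

-- ---------- DP characterisation: dpM t j i is the least w with MSplit (j+1) (take i) w ----------

theorem dpM_zero_right (t : List Int) (j : Nat) : dpM t j 0 = 0 := by
  induction j with
  | zero => simp [dpM, psum]
  | succ n ih => simp [dpM, minp, ih, psum]

theorem dpM_achieves (t : List Int) (h0 : ∀ x ∈ t, 0 ≤ x) :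
    ∀ j i, i ≤ t.length → MSplit (j + 1) (t.take i) (dpM t j i) := by
  intro j
  induction j with
  | zero =>
    intro i _
    exact ⟨[t.take i], rfl, by simp, by intro p hp; simp at hp; subst hp; simp [dpM, psum]⟩
  | succ j ih =>
    intro i hi
    obtain ⟨p, hp, he⟩ := minp_exists (fun p => max (dpM t j p) (psum t i - psum t p)) i
    obtain ⟨ps, hlen, hflat, hsum⟩ := ih p (by omega)
    have hdval : dpM t (j + 1) i = max (dpM t j p) (psum t i - psum t p) := he
    refine ⟨ps ++ [(t.take i).drop p], by simp [hlen], ?_, ?_⟩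
    · rw [List.flatten_append, hflat]
      simp only [List.flatten_cons, List.flatten_nil, List.append_nil]
      have : t.take p = (t.take i).take p := by
        rw [List.take_take]; simp [Nat.min_eq_left hp]
      rw [this, List.take_append_drop]
    · intro q hq
      rcases List.mem_append.mp hq with hq | hq
      · exact le_trans (hsum q hq) (by rw [hdval]; exact le_max_left _ _)
      · simp at hq; subst hq
        rw [seg_sum t p i hp, hdval]
        exact le_max_right _ _

theorem dpM_le (t : List Int) :
    ∀ j i (w : Int), i ≤ t.length → MSplit (j + 1) (t.take i) w → dpM t j i ≤ w := by
  intro j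
  induction j with
  | zero =>
    intro i w _ h
    obtain ⟨ps, hlen, hflat, hsum⟩ := h
    obtain ⟨q, rfl⟩ := List.length_eq_one_iff.mp hlen
    simp only [List.flatten_cons, List.flatten_nil, List.append_nil] at hflat
    have := hsum q (by simp)
    rw [hflat] at this
    exact le_trans (le_of_eq rfl) this
  | succ j ih =>
    intro i w hi h
    obtain ⟨ps, hlen, hflat, hsum⟩ := h
    rcases List.eq_nil_or_concat ps with rfl | ⟨qs, q, rfl⟩
    · simp at hlen
    · have hqlen : qs.length = j + 1 := by simpa using hlen
      rw [List.concat_eq_append] at hflat hsum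
      rw [List.flatten_append] at hflat
      simp only [List.flatten_cons, List.flatten_nil, List.append_nil] at hflat
      have hLlen : (t.take i).length = i := by simp [Nat.min_eq_left hi]
      have hlen2 : qs.flatten.length + q.length = i := by
        have := congrArg List.length hflat
        simpa only [List.length_append, List.length_take, Nat.min_eq_left hi] using this
      have hql : q.length ≤ i := by omega
      set p := i - q.length with hpdef
      have hflen : (qs.flatten).length = p := by omega
      have hqs : qs.flatten = t.take p := by
        have h1 : (qs.flatten ++ q).take p = qs.flatten := by
          rw [List.take_append_of_le_length (by omega), List.take_of_length_le (by omega)]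
        rw [hflat] at h1
        rw [← h1, List.take_take]
        congr 1
        omega
      have hq : q = (t.take i).drop p := by
        have h1 : (qs.flatten ++ q).drop p = q := by
          rw [List.drop_append_of_le_length (by omega), List.drop_of_length_le (by omega)]
          simp
        rw [hflat] at h1
        rw [← h1]
      have hdp : dpM t j p ≤ w := by
        refine ih p w (by omega) ⟨qs, hqlen, hqs, ?_⟩
        intro r hr
        exact hsum r (by simp [hr])
      have hqsum : q.sum ≤ w := hsum q (by simp)
      have hqsum' : psum t i - psum t p ≤ w := by
        rw [← seg_sum t p i (by omega), ← hq]; exact hqsum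
      calc dpM t (j + 1) i ≤ max (dpM t j p) (psum t i - psum t p) :=
            minp_le _ (show p ≤ i by omega)
        _ ≤ w := max_le hdp hqsum'

-- ---------- greedy (A's feasible) facts ----------

theorem gRun_count_le (w : Int) (l : List Int) :
    ∀ c width : Int, c ≤ (gRun w l (c, width)).1 := by
  induction l with
  | nil => intro c width; simp [gRun]
  | cons b r ih =>
    intro c width
    simp only [gRun]
    split
    · exact le_trans (by omega) (ih (c + 1) b)
    · exact ih c (width + b)

theorem gRun_count_bound (w : Int) (l : List Int) :
    ∀ c width : Int, (gRun w l (c, width)).1 ≤ c + l.length := by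
  induction l with
  | nil => intro c width; simp [gRun]
  | cons b r ih =>
    intro c width
    simp only [gRun]
    split
    · have := ih (c + 1) b; simp only [List.length_cons]; omega
    · have := ih c (width + b); simp only [List.length_cons]; omega

theorem gRun_append (w : Int) (l1 l2 : List Int) (s : Int × Int) :
    gRun w (l1 ++ l2) s = gRun w l2 (gRun w l1 s) := by
  induction l1 generalizing s with
  | nil => simp [gRun]
  | cons b r ih =>
    simp only [List.cons_append, gRun]
    split <;> exact ih _

theorem gRun_width_nonneg (w : Int) (l : List Int) (hl : ∀ x ∈ l, 0 ≤ x) :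
    ∀ c width : Int, 0 ≤ width → 0 ≤ (gRun w l (c, width)).2 := by
  induction l with
  | nil => intro c width hw; simpa [gRun] using hw
  | cons b r ih =>
    intro c width hw
    have hb : 0 ≤ b := hl b (by simp)
    have hr : ∀ x ∈ r, 0 ≤ x := fun x hx => hl x (by simp [hx])
    simp only [gRun]
    split
    · exact ih hr (c + 1) b hb
    · exact ih hr c (width + b) (by omega)

-- feasibleGo is exactly 'final greedy count ≤ k' (while the running count is still ≤ k)
theorem feasibleGo_eq_gRun (k w : Int) (l : List Int) :
    ∀ c width : Int, c ≤ k →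
      feasibleGo k w l c width = decide ((gRun w l (c, width)).1 ≤ k) := by
  induction l with
  | nil => intro c width hc; simp [feasibleGo, gRun, hc]
  | cons b r ih =>
    intro c width hc
    simp only [feasibleGo, gRun]
    by_cases hbr : width + b > w
    · simp only [if_pos hbr]
      by_cases hck : c + 1 > k
      · have h1 := gRun_count_le w r (c + 1) b
        simp [hck, show ¬((gRun w r (c + 1, b)).1 ≤ k) by omega]
      · simp only [if_neg hck]
        simpa using ih (c + 1) b (by omega)
    · simp only [if_neg hbr]
      have hck : ¬(c > k) := by omega
      simp only [if_neg hck]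
      simpa using ih c (width + b) hc

-- a part that fits on a fresh shelf is consumed without any break
theorem gRun_no_break (w : Int) (l : List Int) (hl : ∀ x ∈ l, 0 ≤ x) :
    ∀ c width : Int, width + l.sum ≤ w → gRun w l (c, width) = (c, width + l.sum) := by
  induction l with
  | nil => intro c width h; simp [gRun]
  | cons b r ih =>
    intro c width h
    have hr : ∀ x ∈ r, 0 ≤ x := fun x hx => hl x (by simp [hx])
    have hs : 0 ≤ r.sum := List.sum_nonneg hr
    have hnb : ¬(width + b > w) := by simp [List.sum_cons] at h; omega
    simp only [gRun, if_neg hnb]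
    rw [ih hr c (width + b) (by simp [List.sum_cons] at h; omega)]
    simp [List.sum_cons]; ring

-- consuming one part of sum ≤ w costs at most one break
theorem gRun_one_part (w : Int) (l : List Int) (hl : ∀ x ∈ l, 0 ≤ x) (hsum : l.sum ≤ w) :
    ∀ c width : Int, (gRun w l (c, width)).1 ≤ c + 1 := by
  induction l with
  | nil => intro c width; simp [gRun]
  | cons b r ih =>
    intro c width
    have hr : ∀ x ∈ r, 0 ≤ x := fun x hx => hl x (by simp [hx])
    have hb : 0 ≤ b := hl b (by simp)
    simp only [gRun]
    split
    · rw [gRun_no_break w r hr (c + 1) b (by simp [List.sum_cons] at hsum; omega)]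
    · exact ih hr (by simp [List.sum_cons] at hsum; have := List.sum_nonneg hr; omega) c (width + b)

-- greedy is optimal: a valid split into parts bounds the greedy count
theorem gRun_parts (w : Int) (ps : List (List Int)) (h0 : ∀ p ∈ ps, ∀ x ∈ p, 0 ≤ x)
    (hw : ∀ p ∈ ps, p.sum ≤ w) :
    ∀ c width : Int, 0 ≤ width → (gRun w ps.flatten (c, width)).1 ≤ c + ps.length := by
  induction ps with
  | nil => intro c width _; simp [gRun]
  | cons p rest ih =>
    intro c width hwd
    have hp0 : ∀ x ∈ p, 0 ≤ x := h0 p (by simp)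
    have hrest0 : ∀ q ∈ rest, ∀ x ∈ q, 0 ≤ x := fun q hq => h0 q (by simp [hq])
    have hrestw : ∀ q ∈ rest, q.sum ≤ w := fun q hq => hw q (by simp [hq])
    rw [List.flatten_cons, gRun_append]
    have hcount : (gRun w p (c, width)).1 ≤ c + 1 := gRun_one_part w p hp0 (hw p (by simp)) c width
    have hwidth : 0 ≤ (gRun w p (c, width)).2 := gRun_width_nonneg w p hp0 c width hwd
    have hrec := ih hrest0 hrestw (gRun w p (c, width)).1 (gRun w p (c, width)).2 hwidth
    have hmono := gRun_count_le w rest.flatten (gRun w p (c, width)).1 (gRun w p (c, width)).2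
    simp only [List.length_cons]
    have : (gRun w rest.flatten ((gRun w p (c, width)).1, (gRun w p (c, width)).2)) =
        gRun w rest.flatten (gRun w p (c, width)) := by rw [Prod.mk.eta]
    rw [this] at hrec
    omega

-- greedy yields a valid split witnessing its own count
theorem gRun_split (w : Int) (l : List Int) (h0 : ∀ x ∈ l, 0 ≤ x) (hle : ∀ x ∈ l, x ≤ w) :
    ∀ c width : Int, 0 ≤ width → width ≤ w →
      ∃ p0 ps, (p0 :: ps : List (List Int)).flatten = l ∧
        (gRun w l (c, width)).1 = c + ps.length ∧
        width + p0.sum ≤ w ∧ ∀ p ∈ ps, p.sum ≤ w := by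
  induction l with
  | nil =>
    intro c width hwd hww
    exact ⟨[], [], by simp, by simp [gRun], by simpa, by simp⟩
  | cons b r ih =>
    intro c width hwd hww
    have hb0 : 0 ≤ b := h0 b (by simp)
    have hbw : b ≤ w := hle b (by simp)
    have hr0 : ∀ x ∈ r, 0 ≤ x := fun x hx => h0 x (by simp [hx])
    have hrle : ∀ x ∈ r, x ≤ w := fun x hx => hle x (by simp [hx])
    simp only [gRun]
    by_cases hbr : width + b > w
    · simp only [if_pos hbr]
      obtain ⟨p0, ps, hflat, hcnt, hhead, htail⟩ := ih hr0 hrle (c + 1) b hb0 hbw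
      refine ⟨[], (b :: p0) :: ps, ?_, ?_, by simpa, ?_⟩
      · simp only [List.flatten_cons] at hflat ⊢
        simp [hflat]
      · simp only [List.length_cons] at *
        omega
      · intro p hp
        rcases List.mem_cons.mp hp with hp | hp
        · subst hp; simp only [List.sum_cons]; omega
        · exact htail p hp
    · simp only [if_neg hbr]
      obtain ⟨p0, ps, hflat, hcnt, hhead, htail⟩ := ih hr0 hrle c (width + b) (by omega) (by omega)
      refine ⟨b :: p0, ps, ?_, hcnt, ?_, htail⟩
      · simp only [List.flatten_cons] at hflat ⊢
        simp [hflat]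
      · simp only [List.sum_cons]; omega

-- ---------- binary-search loop ----------

theorem fmwGo_eq (k : Int) (t : List Int) (T : Int) :
    ∀ l r : Int, l ≤ T → T ≤ r →
      (∀ m, l ≤ m → m < r → (feasible k t m = true ↔ T ≤ m)) →
      fmwGo k t l r = T := by
  intro l r
  induction l, r using fmwGo.induct k t with
  | case1 l r hlt mid hf ih =>
    intro hlT hTr hpred
    have hm1 := (PySem.Int.le_floordiv_iff_mul_le (a := l + r) (b := 2) (q := l) (by omega)).mpr (by omega)
    have hm2 := (PySem.Int.floordiv_lt_iff_lt_mul (a := l + r) (b := 2) (q := r) (by omega)).mpr (by omega)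
    have hTmid : T ≤ mid := (hpred mid hm1 hm2).mp hf
    rw [fmwGo, dif_pos hlt, if_pos hf]
    exact ih hlT hTmid (fun m hm1' hm2' => hpred m hm1' (by omega))
  | case2 l r hlt mid hf ih =>
    intro hlT hTr hpred
    have hm1 := (PySem.Int.le_floordiv_iff_mul_le (a := l + r) (b := 2) (q := l) (by omega)).mpr (by omega)
    have hm2 := (PySem.Int.floordiv_lt_iff_lt_mul (a := l + r) (b := 2) (q := r) (by omega)).mpr (by omega)
    have hmidT : mid + 1 ≤ T := by
      by_contra hcon
      exact absurd ((hpred mid hm1 hm2).mpr (by omega)) (by simp [hf])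
    rw [fmwGo, dif_pos hlt, if_neg hf]
    exact ih hmidT hTr (fun m hm1' hm2' => hpred m (by omega) hm2')
  | case3 l r hlt =>
    intro hlT hTr _
    rw [fmwGo, dif_neg hlt]
    omega

-- ---------- bridge: port B computes dpM ----------

theorem prefix_foldl (t : List Int) : ∀ (acc : List Int) (s : Int),
    t.foldl (fun a b => (a.1 ++ [a.2 + b], a.2 + b)) (acc, s) =
      (acc ++ (List.range t.length).map (fun i => s + psum t (i + 1)), s + t.sum) := by
  induction t with
  | nil => intro acc s; simp
  | cons b r ih =>
    intro acc s
    simp only [List.foldl_cons]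
    rw [ih]
    simp only [List.length_cons, List.range_succ_eq_map, List.map_cons, List.map_map,
      List.sum_cons, Prod.mk.injEq]
    constructor
    · rw [List.append_assoc]
      congr 1
      simp only [List.singleton_append, List.cons.injEq]
      constructor
      · have : psum (b :: r) (0 + 1) = b + psum r 0 := psum_succ r b 0
        simp [this, psum]
      · apply List.map_congr_left
        intro m _
        simp only [Function.comp_apply]
        rw [show m.succ + 1 = (m + 1) + 1 from rfl, psum_succ r b (m + 1)]
        ring
    · ring

theorem prefix_getD (t : List Int) {i : Nat} (h : i ≤ t.length) :
    (fmwAltPrefix t).1.getD i 0 = psum t i := by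
  unfold fmwAltPrefix
  rw [prefix_foldl t [0] 0]
  cases i with
  | zero => simp [psum]
  | succ m =>
    have hm : m < t.length := by omega
    simp only [List.singleton_append, List.getD_cons_succ]
    rw [List.getD_eq_getElem _ _ (by simpa using hm)]
    simp [hm]

theorem foldl_min_range' (F : Nat → Int) : ∀ i,
    (List.range' 1 i).foldl (fun best p => if F p < best then F p else best) (F 0) = minp F i := by
  intro i
  induction i with
  | zero => simp [minp]
  | succ m ih =>
    rw [List.range'_concat, List.foldl_append, ih]
    simp only [List.foldl_cons, List.foldl_nil, Nat.one_mul, Nat.add_comm 1 m]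
    show _ = min (minp F m) (F (m + 1))
    rcases lt_or_ge (F (m + 1)) (minp F m) with h | h
    · rw [if_pos h, min_eq_right (le_of_lt h)]
    · rw [if_neg (by omega), min_eq_left h]

theorem best_eq (t : List Int) (dp : List Int) (d : Nat → Int) (n : Nat)
    (hn : n = t.length) (hdp : ∀ p ≤ n, dp.getD p 0 = d p) {i : Nat} (hi : i ≤ n) :
    fmwAltBest (fmwAltPrefix t).1 dp i = minp (fun p => max (d p) (psum t i - psum t p)) i := by
  have h1 : fmwAltBest (fmwAltPrefix t).1 dp i =
      (List.range' 1 i).foldl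
        (fun best p => if (fun p => max (dp.getD p 0) ((fmwAltPrefix t).1.getD i 0 - (fmwAltPrefix t).1.getD p 0)) p < best
          then (fun p => max (dp.getD p 0) ((fmwAltPrefix t).1.getD i 0 - (fmwAltPrefix t).1.getD p 0)) p else best)
        ((fun p => max (dp.getD p 0) ((fmwAltPrefix t).1.getD i 0 - (fmwAltPrefix t).1.getD p 0)) 0) := rfl
  rw [h1, foldl_min_range']
  apply minp_congr
  intro p hp
  rw [prefix_getD t (by omega), prefix_getD t (by omega), hdp p (by omega)]

theorem layer_getD (t : List Int) (dp : List Int) (d : Nat → Int) (n : Nat)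
    (hn : n = t.length) (hdp : ∀ p ≤ n, dp.getD p 0 = d p) :
    ∀ i ≤ n, (fmwAltLayer (fmwAltPrefix t).1 dp n).getD i 0 =
      (if i = 0 then 0 else minp (fun p => max (d p) (psum t i - psum t p)) i) := by
  intro i hi
  have h1 : fmwAltLayer (fmwAltPrefix t).1 dp n =
      [0] ++ (List.range' 1 n).map (fun i => fmwAltBest (fmwAltPrefix t).1 dp i) := by
    unfold fmwAltLayer
    exact PySem.List.foldl_append_singleton_eq_map _ _ _
  rw [h1]
  cases i with
  | zero => simp
  | succ m =>
    have hm : m < n := by omega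
    simp only [List.singleton_append, List.getD_cons_succ, if_neg (Nat.succ_ne_zero m)]
    rw [List.getD_eq_getElem _ _ (by simpa using hm)]
    simp only [List.getElem_map, List.getElem_range', Nat.one_mul, Nat.add_comm 1 m]
    exact best_eq t dp d n hn hdp (by omega)

theorem layers_getD (t : List Int) (n : Nat) (hn : n = t.length) :
    ∀ (j : Nat) (i : Nat), i ≤ n →
      ((fun dp => fmwAltLayer (fmwAltPrefix t).1 dp n)^[j] (fmwAltPrefix t).1).getD i 0 =
        dpM t j i := by
  intro j
  induction j with
  | zero =>
    intro i hi
    simpa [dpM] using prefix_getD t (by omega)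
  | succ j ih =>
    intro i hi
    rw [Function.iterate_succ_apply']
    rw [layer_getD t _ (dpM t j) n hn (fun p hp => ih p hp) i hi]
    cases i with
    | zero => simp [dpM_zero_right]
    | succ m => simp only [if_neg (Nat.succ_ne_zero m)]; rfl

theorem foldl_const_iterate {α β : Type} (L : α → α) (lst : List β) (dp0 : α) :
    lst.foldl (fun dp _ => L dp) dp0 = L^[lst.length] dp0 := by
  induction lst generalizing dp0 with
  | nil => rfl
  | cons x r ih =>
    simp only [List.foldl_cons, List.length_cons]
    rw [ih, ← Function.iterate_succ_apply]

-- B's value is the DP value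
theorem alt_eq_dpM (k : Int) (t : List Int) (ht : t ≠ []) :
    find_min_width_alt k t =
      dpM t ((if max k 1 > (t.length : Int) then (t.length : Int) else max k 1) - 1).toNat
        t.length := by
  have hn : 0 < t.length := List.length_pos_iff.mpr ht
  have hpos : (if (0 : Int) < (t.length : Int) then (t.length : Int) else 1) = (t.length : Int) :=
    if_pos (by exact_mod_cast hn)
  unfold find_min_width_alt
  simp only [hpos]
  rw [foldl_const_iterate, PySem.List.length_pyRange_one]
  have harg : ((if max k 1 > (t.length : Int) then (t.length : Int) else max k 1) + 1 - 2)
      = ((if max k 1 > (t.length : Int) then (t.length : Int) else max k 1) - 1) := by ring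
  rw [harg]
  exact layers_getD t t.length rfl _ t.length (le_refl _)

-- k < 1 makes A's feasible vacuously false
theorem feasible_of_klt (k w : Int) (hk : k < 1) (b : Int) (r : List Int) :
    feasible k (b :: r) w = false := by
  simp only [feasible, feasibleGo]
  simp only [zero_add]
  split <;> first | rfl | omega | (split <;> first | rfl | omega)

-- ---------- assembling the two values ----------

theorem cnt_first_no_break (w b : Int) (r : List Int) (hb : 0 + b ≤ w) :
    (gRun w (b :: r) (1, 0)).1 ≤ (b :: r).length := by
  simp only [gRun, if_neg (by omega : ¬((0:Int) + b > w))]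
  have := gRun_count_bound w r 1 (0 + b)
  simp only [List.length_cons]
  omega

theorem find_min_width_spec : Claim_equal_find_min_width := by
  intro k t _ hpre
  obtain ⟨hne, h0⟩ := hpre
  unfold Spec_find_min_width
  have hn1 : 1 ≤ t.length := List.length_pos_iff.mpr hne
  -- the maximum element
  obtain ⟨mx, hmx⟩ : ∃ mx, PySem.List.max? t (fun x => x) = some mx := by
    cases h : PySem.List.max? t (fun x => x) with
    | none => exact absurd ((PySem.List.max?_eq_none_iff t (fun x => x)).mp h) hne
    | some m => exact ⟨m, rfl⟩
  have hmxmem : mx ∈ t := PySem.List.max?_mem hmx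
  have hmxmax : ∀ y ∈ t, y ≤ mx := PySem.List.max?_isMax hmx
  have hmx0 : 0 ≤ mx := h0 mx hmxmem
  have hmxsum : mx ≤ t.sum := List.single_le_sum h0 mx hmxmem
  have hsum0 : 0 ≤ t.sum := List.sum_nonneg h0
  simp only [find_min_width, hmx]
  rw [alt_eq_dpM k t hne]
  set nI : Int := (t.length : Int) with hnI
  have hnI1 : 1 ≤ nI := by rw [hnI]; exact_mod_cast hn1
  by_cases hk : 1 ≤ k
  · -- k ≥ 1 : both sides are the DP optimum
    have hmaxk : max k 1 = k := max_eq_left hk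
    set kk : Int := if max k 1 > nI then nI else max k 1 with hkk
    have hkk1 : 1 ≤ kk := by rw [hkk]; split_ifs <;> omega
    have hkkk : kk ≤ k := by rw [hkk, hmaxk]; split_ifs <;> omega
    have hkkn : kk ≤ nI := by rw [hkk]; split_ifs <;> omega
    set K : Nat := (kk - 1).toNat with hK
    have hKkk : (K : Int) + 1 = kk := by omega
    set T : Int := dpM t K t.length with hT
    have hach : MSplit (K + 1) t T := by
      have := dpM_achieves t h0 K t.length (le_refl _)
      rwa [List.take_length] at this
    have hTle : ∀ w : Int, MSplit (K + 1) t w → T ≤ w := by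
      intro w h
      exact dpM_le t K t.length w (le_refl _) (by rwa [List.take_length])
    have hT_ge : mx ≤ T := by
      obtain ⟨ps, hlen, hflat, hsum⟩ := hach
      obtain ⟨p, hpmem, hmxp⟩ := List.mem_flatten.mp (hflat ▸ hmxmem)
      have hp0 : ∀ x ∈ p, 0 ≤ x := fun x hx =>
        h0 x (hflat ▸ List.mem_flatten.mpr ⟨p, hpmem, hx⟩)
      exact le_trans (List.single_le_sum hp0 mx hmxp) (hsum p hpmem)
    have hT_le : T ≤ t.sum := by
      refine hTle t.sum (MSplit_pad 1 (K + 1) t ⟨[t], rfl, by simp, ?_⟩ hsum0 (by omega))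
      intro p hp; simp at hp; subst hp; exact le_refl _
    have hpred : ∀ m, mx ≤ m → m < t.sum → (feasible k t m = true ↔ T ≤ m) := by
      intro m hm1 _
      have hm0 : 0 ≤ m := le_trans hmx0 hm1
      have hle : ∀ x ∈ t, x ≤ m := fun x hx => le_trans (hmxmax x hx) hm1
      constructor
      · intro hfeas
        rw [show feasible k t m = feasibleGo k m t 1 0 from rfl,
          feasibleGo_eq_gRun k m t 1 0 hk] at hfeas
        have hcnt : (gRun m t (1, 0)).1 ≤ k := by simpa using hfeas
        obtain ⟨b, r, rfl⟩ := List.exists_cons_of_ne_nil hne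
        have hcara : (gRun m (b :: r) (1, 0)).1 ≤ (b :: r).length :=
          cnt_first_no_break m b r (by have := hle b (by simp); omega)
        obtain ⟨p0, ps, hflat, hcnt2, hhead, htail⟩ :=
          gRun_split m (b :: r) h0 hle 1 0 (le_refl _) hm0
        have hlen : (1 : Int) + ps.length ≤ kk := by
          rw [hcnt2] at hcnt hcara
          rcases le_or_gt (max k 1) nI with h | h
          · rw [hkk, if_neg (by omega)]; omega
          · rw [hkk, if_pos h]
            simp only [hnI, List.length_cons] at hcara ⊢
            push_cast at hcara ⊢
            omega
        refine hTle m (MSplit_pad (ps.length + 1) (K + 1) (b :: r) ⟨p0 :: ps, by simp, hflat, ?_⟩ hm0 (by omega))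
        intro p hp
        rcases List.mem_cons.mp hp with hp | hp
        · subst hp; omega
        · exact htail p hp
      · intro hTm
        obtain ⟨ps, hlen, hflat, hsum⟩ := MSplit_mono (K + 1) t hach hTm
        rcases ps with _ | ⟨p0, rest⟩
        · simp at hlen
        · have hrlen : rest.length = K := by simpa using hlen
          have hpmem0 : ∀ p ∈ (p0 :: rest), ∀ x ∈ p, 0 ≤ x := fun p hp x hx =>
            h0 x (hflat ▸ List.mem_flatten.mpr ⟨p, hp, hx⟩)
          rw [show feasible k t m = feasibleGo k m t 1 0 from rfl,
            feasibleGo_eq_gRun k m t 1 0 hk]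
          rw [← hflat, List.flatten_cons, gRun_append]
          rw [gRun_no_break m p0 (hpmem0 p0 (by simp)) 1 0 (by have := hsum p0 (by simp); omega)]
          have hparts := gRun_parts m rest (fun p hp => hpmem0 p (by simp [hp]))
            (fun p hp => hsum p (by simp [hp])) 1 (0 + p0.sum)
            (by have := List.sum_nonneg (hpmem0 p0 (by simp)); omega)
          simp only [decide_eq_true_eq]
          rw [hrlen] at hparts
          omega
    rw [fmwGo_eq k t T mx t.sum hT_ge hT_le hpred]
  · -- k < 1 : A's feasibility test is always false, both sides give sum(thickness)
    rw [not_le] at hk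
    have hmaxk : max k 1 = 1 := max_eq_right (by omega)
    have hkk : (if max k 1 > nI then nI else max k 1) = 1 := by
      rw [hmaxk, if_neg (by omega)]
    rw [hkk]
    obtain ⟨b, r, rfl⟩ := List.exists_cons_of_ne_nil hne
    have hpred : ∀ m, mx ≤ m → m < (b :: r).sum → (feasible k (b :: r) m = true ↔ (b :: r).sum ≤ m) := by
      intro m _ hm2
      rw [feasible_of_klt k m (by omega) b r]
      constructor
      · intro h; exact absurd h (by simp)
      · intro h; omega
    rw [fmwGo_eq k (b :: r) (b :: r).sum mx (b :: r).sum hmxsum (le_refl _) hpred]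
    rw [show ((1 : Int) - 1).toNat = 0 from rfl]
    rw [show dpM (b :: r) 0 (b :: r).length = psum (b :: r) (b :: r).length from rfl, psum_length]
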